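-- pv_equiv track=rewrite | github.com/ericjkge/leetcode | problem-1762180896373/problem-1762180896373.py | findMissingElements
-- ===== SOURCE A (Python) =====
-- from typing import List
--
-- def findMissingElements(nums: List[int]) -> List[int]:
--     nums.sort()
--     ans = []
--
--     for i in range(len(nums)):
--         if i and nums[i] > nums[i - 1] + 1:
--             for j in range(nums[i - 1] + 1, nums[i]):
--                 ans.append(j)
--
--     return ans
-- ===== SOURCE B (Python) =====
-- from typing import List
--
-- def findMissingElements(nums: List[int]) -> List[int]:
--     if not nums:
--         return []
--     nums.sort()
--     present = set(nums)
--     return [x for x in range(nums[0], nums[-1] + 1) if x not in present]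
-- ===== Notes on version B (the rewrite author's own statement) =====
-- stated objective: idiomatic
-- what changed: Replaced the adjacent-pair gap walk with a set of the values plus a single comprehension over the whole min-to-max span keeping the absent integers.
import Mathlib
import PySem

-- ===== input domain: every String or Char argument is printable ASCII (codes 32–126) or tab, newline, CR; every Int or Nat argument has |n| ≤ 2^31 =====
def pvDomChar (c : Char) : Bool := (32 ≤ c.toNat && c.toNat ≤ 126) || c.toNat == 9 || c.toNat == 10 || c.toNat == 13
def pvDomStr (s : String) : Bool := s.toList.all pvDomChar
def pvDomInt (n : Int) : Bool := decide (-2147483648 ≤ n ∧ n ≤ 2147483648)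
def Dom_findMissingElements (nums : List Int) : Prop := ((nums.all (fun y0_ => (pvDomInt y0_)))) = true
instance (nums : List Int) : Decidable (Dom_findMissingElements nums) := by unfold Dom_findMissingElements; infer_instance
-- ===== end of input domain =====

-- B replaces A's adjacent-pair gap walk by a set plus one filter over the min-to-max span (idiomatic).
-- Both Pythons sort `nums` in place; the equivalence proved here is about the RETURN value.

-- ===== PORT A =====
-- Python's local `nums` after `nums.sort()` is written inline as `sorted nums`
def findMissingElements (nums : List Int) : List Int :=
  (PySem.List.pyRange 0 ((PySem.List.sorted nums (fun x => x) false).length : Int) 1).foldl (fun ans i =>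
    if i ≠ 0 ∧ PySem.List.pyGetD (PySem.List.sorted nums (fun x => x) false) i 0 >
        PySem.List.pyGetD (PySem.List.sorted nums (fun x => x) false) (i - 1) 0 + 1 then
      ans ++ PySem.List.pyRange (PySem.List.pyGetD (PySem.List.sorted nums (fun x => x) false) (i - 1) 0 + 1)
        (PySem.List.pyGetD (PySem.List.sorted nums (fun x => x) false) i 0) 1
    else ans) []

-- ===== PORT B =====
def findMissingElements_alt (nums : List Int) : List Int :=
  if nums = [] then []
  else
    (PySem.List.pyRange (PySem.List.pyGetD (PySem.List.sorted nums (fun x => x) false) 0 0)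
        (PySem.List.pyGetD (PySem.List.sorted nums (fun x => x) false) (-1) 0 + 1) 1).filter
      (fun x => !(PySem.Set.contains (PySem.Set.ofList (PySem.List.sorted nums (fun x => x) false)) x))

-- ===== PRECONDITION & SPEC =====
def Spec_findMissingElements (nums : List Int) (out : List Int) : Prop := out = findMissingElements_alt nums
instance (nums : List Int) (out : List Int) : Decidable (Spec_findMissingElements nums out) := by unfold Spec_findMissingElements; infer_instance

-- ===== CLAIM (what is proved, stated in full; the proofs are below) =====
def Claim_equal_findMissingElements : Prop := ∀ (nums : List Int), Dom_findMissingElements nums → Spec_findMissingElements nums (findMissingElements nums)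

-- ===== LEMMAS AND PROOFS =====

-- the list of gaps between `prev` and the successive elements of the list
def pairGaps : Int → List Int → List Int
  | _, [] => []
  | prev, c :: t => PySem.List.pyRange (prev + 1) c 1 ++ pairGaps c t

-- A's index fold, starting at index |u| ≥ 1 with last-of-u = prev, produces the pair gaps of v
theorem foldGap (s : List Int) (v : List Int) : ∀ (u : List Int) (prev : Int) (acc : List Int),
    s = u ++ v → u ≠ [] → u.getLast? = some prev →
    (PySem.List.pyRange (u.length : Int) (s.length : Int) 1).foldl (fun ans i =>
      if i ≠ 0 ∧ PySem.List.pyGetD s i 0 > PySem.List.pyGetD s (i - 1) 0 + 1 then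
        ans ++ PySem.List.pyRange (PySem.List.pyGetD s (i - 1) 0 + 1) (PySem.List.pyGetD s i 0) 1
      else ans) acc = acc ++ pairGaps prev v := by
  induction v with
  | nil =>
    intro u prev acc hs hu hlast
    subst hs
    simp [pairGaps, PySem.List.pyRange_one_eq_nil]
  | cons c v' ih =>
    intro u prev acc hs hu hlast
    have hlen : s.length = u.length + (c :: v').length := by rw [hs, List.length_append]
    have hlt : (u.length : Int) < (s.length : Int) := by
      rw [hlen]; push_cast; simp
    rw [PySem.List.pyRange_one_cons hlt]
    have hupos : 0 < u.length := List.length_pos_iff.mpr hu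
    -- lookups at index |u| and |u| - 1
    have hget : PySem.List.pyGetD s (u.length : Int) 0 = c := by
      rw [hs]
      simp [PySem.List.pyGetD_natCast, List.getD]
    have hget' : PySem.List.pyGetD s ((u.length : Int) - 1) 0 = prev := by
      have h1 : (u.length : Int) - 1 = ((u.length - 1 : Nat) : Int) := by push_cast [hupos]; omega
      rw [h1, PySem.List.pyGetD_natCast, hs]
      have hlt' : u.length - 1 < u.length := by omega
      rw [List.getD, List.getElem?_append_left hlt']
      rw [List.getLast?_eq_getElem?] at hlast
      simp [hlast]
    simp only [List.foldl_cons]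
    have hne0 : (u.length : Int) ≠ 0 := by positivity
    have hstep : (if (u.length : Int) ≠ 0 ∧ PySem.List.pyGetD s (u.length : Int) 0 > PySem.List.pyGetD s ((u.length : Int) - 1) 0 + 1 then
        acc ++ PySem.List.pyRange (PySem.List.pyGetD s ((u.length : Int) - 1) 0 + 1) (PySem.List.pyGetD s (u.length : Int) 0) 1
      else acc) = acc ++ PySem.List.pyRange (prev + 1) c 1 := by
      rw [hget, hget']
      by_cases hc : c > prev + 1
      · rw [if_pos ⟨hne0, hc⟩]
      · rw [if_neg (by tauto), PySem.List.pyRange_one_eq_nil (by omega : c ≤ prev + 1)]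
        exact (List.append_nil acc).symm
    rw [hstep]
    have hcast : (u.length : Int) + 1 = ((u ++ [c]).length : Int) := by
      simp
    rw [hcast, ih (u ++ [c]) c (acc ++ PySem.List.pyRange (prev + 1) c 1)
      (by rw [hs]; simp) (by simp) (by simp)]
    simp [pairGaps]

-- A equals the pairGaps of the sorted list
theorem a_eq_pairGaps (nums : List Int) :
    findMissingElements nums =
      match PySem.List.sorted nums (fun x => x) false with
      | [] => []
      | a :: t => pairGaps a t := by
  unfold findMissingElements
  cases hs : PySem.List.sorted nums (fun x => x) false with
  | nil => simp [PySem.List.pyRange_one_eq_nil]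
  | cons a t =>
    have hlt : (0 : Int) < ((a :: t).length : Int) := by
      simp only [List.length_cons]; positivity
    rw [PySem.List.pyRange_one_cons hlt]
    simp only [List.foldl_cons]
    rw [if_neg (by simp)]
    rw [show (0 : Int) + 1 = (([a] : List Int).length : Int) by simp]
    rw [foldGap (a :: t) t [a] a [] (by simp) (by simp) (by simp)]
    simp

-- in a sorted cons, the head is at most every element
theorem head_le_of_sorted {a : Int} {t : List Int} (h : (a :: t).Pairwise (· ≤ ·)) :
    ∀ y ∈ a :: t, a ≤ y := by
  intro y hy
  rcases List.mem_cons.mp hy with rfl | hy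
  · exact le_refl y
  · exact (List.pairwise_cons.mp h).1 y hy

theorem head_le_getLast {a : Int} {t : List Int} (h : (a :: t).Pairwise (· ≤ ·)) :
    a ≤ (a :: t).getLast (List.cons_ne_nil a t) := by
  exact head_le_of_sorted h _ (List.getLast_mem _)

-- the span filter over a sorted list computes the pair gaps
theorem filtGap (t : List Int) : ∀ (a : Int), (a :: t).Pairwise (· ≤ ·) →
    (PySem.List.pyRange a ((a :: t).getLast (List.cons_ne_nil a t) + 1) 1).filter
      (fun x => !(decide (x ∈ a :: t))) = pairGaps a t := by
  induction t with
  | nil =>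
    intro a _
    simp [pairGaps, PySem.List.pyRange_one_singleton]
  | cons c t' ih =>
    intro a hsorted
    have hac : a ≤ c := (List.pairwise_cons.mp hsorted).1 c (by simp)
    have hsorted' : (c :: t').Pairwise (· ≤ ·) := (List.pairwise_cons.mp hsorted).2
    have hlast : (a :: c :: t').getLast (List.cons_ne_nil _ _) =
        (c :: t').getLast (List.cons_ne_nil _ _) := by
      simp [List.getLast_cons]
    have hcl : c ≤ (c :: t').getLast (List.cons_ne_nil _ _) := head_le_getLast hsorted'
    rw [hlast, PySem.List.pyRange_one_append a c _ hac (by omega), List.filter_append]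
    -- first segment: values in [a, c) are in the list iff they equal a
    have hfirst : (PySem.List.pyRange a c 1).filter (fun x => !(decide (x ∈ a :: c :: t')))
        = PySem.List.pyRange (a + 1) c 1 := by
      by_cases hlt : a < c
      · rw [PySem.List.pyRange_one_cons hlt]
        have hmem : ∀ x ∈ PySem.List.pyRange (a + 1) c 1,
            (!(decide (x ∈ a :: c :: t'))) = true := by
          intro x hx
          have hx' := PySem.List.mem_pyRange_one.mp hx
          simp only [Bool.not_eq_true', decide_eq_false_iff_not]
          intro hmem
          rcases List.mem_cons.mp hmem with rfl | hmem
          · omega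
          · have := head_le_of_sorted hsorted' x hmem; omega
        simp only [List.filter_cons]
        rw [if_neg (by simp)]
        exact List.filter_eq_self.mpr hmem
      · rw [PySem.List.pyRange_one_eq_nil (by omega : c ≤ a),
            PySem.List.pyRange_one_eq_nil (by omega : c ≤ a + 1)]
        rfl
    -- second segment: values ≥ c are in a :: c :: t' iff in c :: t'
    have hsecond : (PySem.List.pyRange c ((c :: t').getLast (List.cons_ne_nil _ _) + 1) 1).filter
        (fun x => !(decide (x ∈ a :: c :: t')))
        = pairGaps c t' := by
      rw [List.filter_congr (fun x hx => by
        have hx' := PySem.List.mem_pyRange_one.mp hx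
        show (!(decide (x ∈ a :: c :: t'))) = (!(decide (x ∈ c :: t')))
        by_cases hm : x ∈ c :: t'
        · simp [hm]
        · have hxa : x ≠ a ∨ x ∈ c :: t' := by
            by_cases hxa : x = a
            · subst hxa
              right
              have : x = c := by omega
              simp [this]
            · exact Or.inl hxa
          rcases hxa with hxa | hxa
          · simp [hm, hxa]
          · exact absurd hxa hm)]
      exact ih c hsorted'
    rw [hfirst, hsecond, pairGaps]

-- ===== VERDICT (by name: the statement is the Claim_ definition above) =====
theorem findMissingElements_spec : Claim_equal_findMissingElements := by
  intro nums _
  show findMissingElements nums = findMissingElements_alt nums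
  rw [a_eq_pairGaps]
  unfold findMissingElements_alt
  by_cases hnil : nums = []
  · subst hnil; simp [PySem.List.sorted]
  · rw [if_neg hnil]
    have hsne : PySem.List.sorted nums (fun x => x) false ≠ [] := by
      simpa [PySem.List.sorted_eq_nil_iff] using hnil
    cases hs : PySem.List.sorted nums (fun x => x) false with
    | nil => exact absurd hs hsne
    | cons a t =>
      have hsorted : (a :: t).Pairwise (· ≤ ·) := by
        have := PySem.List.sorted_pairwise (xs := nums) (key := fun x => x)
        rw [hs] at this
        simpa using this
      rw [show (match a :: t with | [] => ([] : List Int) | a :: t => pairGaps a t) = pairGaps a t from rfl]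
      rw [PySem.List.pyGetD_zero_cons, PySem.List.pyGetD_neg_one (a :: t) 0 (List.cons_ne_nil a t)]
      rw [← filtGap t a hsorted]
      apply List.filter_congr
      intro x _
      simp [PySem.Set.mem_ofList]
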